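-- pv_equiv track=rewrite | github.com/workfloworchestrator/orchestrator-core | orchestrator/cli/generator/generator/helpers.py | insert_into_imports
-- ===== SOURCE A (Python) =====
-- from collections.abc import Generator, Iterable
--
-- def insert_into_imports(content: list[str], new_import: str) -> list[str]:
--     # Note: we may consider using a real Python parser here someday, but for now this is ok and formatting
--     # gets done by isort and black.
--     def produce() -> Generator:
--         not_inserted_yet = True
--         for line in content:
--             if line.startswith("from ") and not_inserted_yet:
--                 yield new_import
--                 not_inserted_yet = False
--             yield line
--
--     return list(produce())
-- ===== SOURCE B (Python) =====
-- def insert_into_imports(content: list[str], new_import: str) -> list[str]: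
--     i = next((i for i, line in enumerate(content) if line.startswith("from ")), None)
--     if i is None:
--         return list(content)
--     return content[:i] + [new_import] + content[i:]
-- ===== Notes on version B (the rewrite author's own statement) =====
-- stated objective: simpler
-- what changed: Replaces A's generator-with-flag single pass by a two-phase locate-then-splice: find the first 'from ' line's index, then return content[:i] + [new_import] + content[i:] (or a fresh copy if none).
import Mathlib
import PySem

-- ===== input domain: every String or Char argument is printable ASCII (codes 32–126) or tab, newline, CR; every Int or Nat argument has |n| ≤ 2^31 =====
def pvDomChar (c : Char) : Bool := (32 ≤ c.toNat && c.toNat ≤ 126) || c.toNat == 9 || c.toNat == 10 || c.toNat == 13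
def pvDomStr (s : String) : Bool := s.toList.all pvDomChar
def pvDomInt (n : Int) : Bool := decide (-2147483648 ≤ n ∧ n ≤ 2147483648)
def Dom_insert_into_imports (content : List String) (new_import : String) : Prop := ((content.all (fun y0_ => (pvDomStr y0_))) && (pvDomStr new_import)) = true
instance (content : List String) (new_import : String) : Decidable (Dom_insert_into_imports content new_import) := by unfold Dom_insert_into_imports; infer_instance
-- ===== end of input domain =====

-- B replaces A's generator-with-flag single pass by a locate-then-splice decomposition (simpler); same cost.


-- ===== PORT A =====
-- literal port of A: one pass with a not_inserted_yet flag
def pvGoA (new_import : String) (flag : Bool) : List String → List String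
  | [] => []
  | line :: rest =>
    if PySem.Str.startswith line "from " && flag then
      new_import :: line :: pvGoA new_import false rest
    else
      line :: pvGoA new_import flag rest

def insert_into_imports (content : List String) (new_import : String) : List String :=
  pvGoA new_import true content

-- ===== PORT B =====
-- port of B: locate the first 'from ' line, then splice
def insert_into_imports_alt (content : List String) (new_import : String) : List String :=
  match content.findIdx? (fun line => PySem.Str.startswith line "from ") with
  | none => content
  | some i => content.take i ++ [new_import] ++ content.drop i

-- ===== PRECONDITION & SPEC =====
def Spec_insert_into_imports (content : List String) (new_import : String) (out : List String) : Prop := out = insert_into_imports_alt content new_import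
instance (content : List String) (new_import : String) (out : List String) : Decidable (Spec_insert_into_imports content new_import out) := by unfold Spec_insert_into_imports; infer_instance

-- ===== CLAIM (what is proved, stated in full; the proofs are below) =====
def Claim_equal_insert_into_imports : Prop := ∀ (content : List String) (new_import : String), Dom_insert_into_imports content new_import → Spec_insert_into_imports content new_import (insert_into_imports content new_import)

-- ===== LEMMAS AND PROOFS =====

-- ===== VERDICT (by name: the statement is the Claim_ definition above) =====
theorem pvGoA_false (new_import : String) (l : List String) :
    pvGoA new_import false l = l := by
  induction l with
  | nil => rfl
  | cons a t ih => simp [pvGoA, ih]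

theorem pvGo_eq_alt (new_import : String) (content : List String) :
    pvGoA new_import true content = insert_into_imports_alt content new_import := by
  induction content with
  | nil => rfl
  | cons line rest ih =>
    simp only [insert_into_imports_alt] at ih ⊢
    simp only [pvGoA, List.findIdx?_cons]
    simp only [PySem.Str.startswith] at ih ⊢
    by_cases h : PySem.Chars.startswith line.toList "from ".toList = true
    · simp only [h, Bool.and_true, if_pos]
      simp [pvGoA_false]
    · simp only [Bool.and_true]
      rw [if_neg h, if_neg h]
      cases hf : List.findIdx? (fun l => PySem.Chars.startswith l.toList "from ".toList) rest with
      | none => rw [hf] at ih; simpa using ih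
      | some i => rw [hf] at ih; simp [ih, List.take_succ_cons, List.drop_succ_cons]

theorem insert_into_imports_spec : Claim_equal_insert_into_imports := by
  intro content new_import _
  unfold Spec_insert_into_imports insert_into_imports
  exact pvGo_eq_alt new_import content
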